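-- pv_equiv track=rewrite | github.com/KartikVashishta/MultiAgentDiplomaticDebate | src/madd/agents/country.py | _enforce_vote_policy
-- ===== SOURCE A (Python) =====
-- def _enforce_vote_policy(
--     clause_votes: dict[str, str],
--     votable_ids: set[str],
--     strict: bool,
-- ) -> dict[str, str]:
--     if not votable_ids:
--         return {}
--     votes: dict[str, str] = {}
--     extras = set(clause_votes) - votable_ids
--     if extras and strict:
--         raise ValueError(f"Votes include non-votable clause IDs: {sorted(extras)}")
--     for cid, vote in clause_votes.items():
--         if cid not in votable_ids:
--             continue
--         if vote not in {"support", "oppose", "amend", "abstain"}: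
--             if strict:
--                 raise ValueError(f"Invalid vote '{vote}' for {cid}")
--             vote = "abstain"
--         votes[cid] = vote
--     missing = votable_ids - set(votes)
--     if missing:
--         if strict:
--             raise ValueError(f"Missing votes for clauses: {sorted(missing)}")
--         for cid in missing:
--             votes[cid] = "abstain"
--     return votes
-- ===== SOURCE B (Python) =====
-- _VALID = {"support", "oppose", "amend", "abstain"}
--
--
-- def _enforce_vote_policy(
--     clause_votes: dict[str, str],
--     votable_ids: set[str],
--     strict: bool,
-- ) -> dict[str, str]:
--     if not votable_ids:
--         return {}
--     if strict:
--         extras = sorted(set(clause_votes) - votable_ids)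
--         if extras:
--             raise ValueError(f"Votes include non-votable clause IDs: {extras}")
--         for cid, vote in clause_votes.items():
--             if vote not in _VALID:
--                 raise ValueError(f"Invalid vote '{vote}' for {cid}")
--         missing = sorted(votable_ids - clause_votes.keys())
--         if missing:
--             raise ValueError(f"Missing votes for clauses: {missing}")
--     present = [c for c in clause_votes if c in votable_ids]
--     seen = set(present)
--     order = present + [c for c in votable_ids if c not in seen]
--     return {
--         c: (clause_votes[c] if clause_votes.get(c) in _VALID else "abstain")
--         for c in order
--     }
-- ===== Notes on version B (the rewrite author's own statement) =====
-- stated objective: simpler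
-- what changed: B lifts the three strict-mode validations into separate up-front passes (extras, first invalid vote in clause_votes order, missing) and then builds the result in one dict comprehension over a precomputed key order (votable keys of clause_votes, then absent votable ids), using a lookup-and-normalize per key instead of A's single stateful loop with inline raises plus a post-hoc missing-votes fixup loop.
import Mathlib
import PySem

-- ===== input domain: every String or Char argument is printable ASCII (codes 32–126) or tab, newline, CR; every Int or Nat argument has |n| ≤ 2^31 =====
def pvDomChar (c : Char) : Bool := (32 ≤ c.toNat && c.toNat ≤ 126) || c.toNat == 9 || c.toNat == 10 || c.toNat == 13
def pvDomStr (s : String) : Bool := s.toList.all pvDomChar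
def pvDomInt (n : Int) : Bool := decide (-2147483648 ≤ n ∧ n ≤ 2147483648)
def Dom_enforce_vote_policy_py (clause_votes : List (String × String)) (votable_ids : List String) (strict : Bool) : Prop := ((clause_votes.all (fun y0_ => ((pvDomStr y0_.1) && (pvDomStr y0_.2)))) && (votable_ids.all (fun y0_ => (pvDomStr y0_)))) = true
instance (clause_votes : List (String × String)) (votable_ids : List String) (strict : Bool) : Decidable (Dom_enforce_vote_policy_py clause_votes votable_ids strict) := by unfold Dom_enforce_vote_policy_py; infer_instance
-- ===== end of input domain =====

-- B separates the strict-mode validations into up-front passes and builds the result by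
-- mapping a lookup-and-normalize over a precomputed key order, instead of A's stateful
-- insert loop with inline raises plus a missing-votes fixup loop (objective: simpler).

-- ===== PORT A =====
-- vote in {"support", "oppose", "amend", "abstain"}
def pyVoteValid (v : String) : Bool :=
  v == "support" || v == "oppose" || v == "amend" || v == "abstain"

def enforce_vote_policy_py (clause_votes : List (String × String)) (votable_ids : List String) (strict : Bool) : List (String × String) :=
  if votable_ids.isEmpty then []
  else
    -- extras = set(clause_votes) - votable_ids
    let extras : PySem.Set String := PySem.Set.diff (PySem.Set.ofList (clause_votes.map Prod.fst)) votable_ids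
    if !extras.isEmpty && strict then []   -- raise ValueError (excluded by Pre_)
    else
      -- the for-loop over clause_votes.items(); `none` models the strict-mode raise
      match clause_votes.foldl (fun acc p =>
          match acc with
          | none => none
          | some (votes : PySem.Dict String String) =>
            if !votable_ids.contains p.1 then some votes
            else if !pyVoteValid p.2 then
              if strict then none          -- raise ValueError (excluded by Pre_)
              else some (votes.insert p.1 "abstain")
            else some (votes.insert p.1 p.2))
        (some PySem.Dict.empty) with
      | none => []
      | some votes =>
        -- missing = votable_ids - set(votes); Python's set iteration order is arbitrary,
        -- fixed here (consistently in both ports) as votable_ids order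
        let missing := votable_ids.filter (fun c => !votes.contains c)
        if !missing.isEmpty then
          if strict then []               -- raise ValueError (excluded by Pre_)
          else (missing.foldl (fun vs c => vs.insert c "abstain") votes).items
        else votes.items

-- ===== PORT B =====
def enforce_vote_policy_py_alt (clause_votes : List (String × String)) (votable_ids : List String) (strict : Bool) : List (String × String) :=
  if votable_ids.isEmpty then []
  -- three up-front strict-mode validation passes; each [] models a raise (excluded by Pre_)
  else if strict && !(PySem.Set.diff (PySem.Set.ofList (clause_votes.map Prod.fst)) votable_ids).isEmpty then []
  else if strict && clause_votes.any (fun p => !pyVoteValid p.2) then []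
  else if strict && votable_ids.any (fun c => !(clause_votes.map Prod.fst).contains c) then []
  else
    let present := (clause_votes.map Prod.fst).filter (fun c => votable_ids.contains c)
    let order := present ++ votable_ids.filter (fun c => !present.contains c)
    order.map (fun c =>
      (c, match (PySem.Dict.mk clause_votes).get? c with
          | some v => if pyVoteValid v then v else "abstain"
          | none => "abstain"))

-- ===== PRECONDITION & SPEC =====
-- Pre_ excludes (a) the strict-mode inputs on which A raises ValueError, and (b) association
-- lists with duplicate clause_votes keys or duplicate votable_ids, which cannot arise from
-- Python's dict/set arguments (dict/set collapsing makes the raw-list behaviour accidental).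
def Pre_enforce_vote_policy_py (clause_votes : List (String × String)) (votable_ids : List String) (strict : Bool) : Prop :=
  (clause_votes.map Prod.fst).Nodup ∧ votable_ids.Nodup ∧
  (strict = true → votable_ids ≠ [] →
    ((∀ p ∈ clause_votes, p.1 ∈ votable_ids ∧ pyVoteValid p.2 = true) ∧
     (∀ c ∈ votable_ids, c ∈ clause_votes.map Prod.fst)))
instance (clause_votes : List (String × String)) (votable_ids : List String) (strict : Bool) : Decidable (Pre_enforce_vote_policy_py clause_votes votable_ids strict) := by unfold Pre_enforce_vote_policy_py; infer_instance

def pvWitness_enforce_vote_policy_py : (List (String × String)) × List String × Bool :=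
  ([("c1", "support"), ("c2", "bogus")], ["c1", "c2", "c3"], false)

def Spec_enforce_vote_policy_py (clause_votes : List (String × String)) (votable_ids : List String) (strict : Bool) (out : List (String × String)) : Prop := out = enforce_vote_policy_py_alt clause_votes votable_ids strict
instance (clause_votes : List (String × String)) (votable_ids : List String) (strict : Bool) (out : List (String × String)) : Decidable (Spec_enforce_vote_policy_py clause_votes votable_ids strict out) := by unfold Spec_enforce_vote_policy_py; infer_instance

-- ===== CLAIM (what is proved, stated in full; the proofs are below) =====
def Claim_equal_enforce_vote_policy_py : Prop := ∀ (clause_votes : List (String × String)) (votable_ids : List String) (strict : Bool), Dom_enforce_vote_policy_py clause_votes votable_ids strict → Pre_enforce_vote_policy_py clause_votes votable_ids strict → Spec_enforce_vote_policy_py clause_votes votable_ids strict (enforce_vote_policy_py clause_votes votable_ids strict)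

-- ===== LEMMAS AND PROOFS =====

-- normalized vote value (proof-side abbreviation)
def pvNorm (v : String) : String := if pyVoteValid v then v else "abstain"

-- the value B looks up for a key
def pvLook (cv : List (String × String)) (c : String) : String :=
  match (PySem.Dict.mk cv).get? c with
  | some v => if pyVoteValid v then v else "abstain"
  | none => "abstain"

theorem pv_foldA_false (vids : List String) (cv : List (String × String)) (d : PySem.Dict String String) :
    cv.foldl (fun acc p =>
      match acc with
      | none => none
      | some votes =>
        if !vids.contains p.1 then some votes
        else if !pyVoteValid p.2 then some (votes.insert p.1 "abstain")
        else some (votes.insert p.1 p.2)) (some d)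
    = some (cv.foldl (fun vs p => if vids.contains p.1 then vs.insert p.1 (pvNorm p.2) else vs) d) := by
  induction cv generalizing d with
  | nil => rfl
  | cons p t ih =>
    simp only [List.foldl_cons, pvNorm]
    by_cases h1 : vids.contains p.1 <;> by_cases h2 : pyVoteValid p.2 <;>
      · simp only [h1, h2, pvNorm, Bool.not_true, Bool.false_eq_true, if_false, if_true]
        exact ih _

theorem pv_foldA_true (vids : List String) (cv : List (String × String)) (d : PySem.Dict String String)
    (h : ∀ p ∈ cv, vids.contains p.1 = true ∧ pyVoteValid p.2 = true) :
    cv.foldl (fun acc p =>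
      match acc with
      | none => none
      | some votes =>
        if !vids.contains p.1 then some votes
        else if !pyVoteValid p.2 then none
        else some (votes.insert p.1 p.2)) (some d)
    = some (cv.foldl (fun vs p => vs.insert p.1 p.2) d) := by
  induction cv generalizing d with
  | nil => rfl
  | cons p t ih =>
    obtain ⟨h1, h2⟩ := h p (List.mem_cons_self ..)
    simp only [List.foldl_cons, h1, h2]
    exact ih _ (fun q hq => h q (List.mem_cons_of_mem _ hq))

theorem pv_filter_map_nodup (cv : List (String × String)) (P : String → Bool)
    (hnd : (cv.map Prod.fst).Nodup) :
    ((cv.filter (fun p => P p.1)).map Prod.fst).Nodup :=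
  hnd.sublist (List.Sublist.map Prod.fst List.filter_sublist)

theorem pv_items_gfold (vids : List String) (cv : List (String × String))
    (hnd : (cv.map Prod.fst).Nodup) :
    (cv.foldl (fun vs p => if vids.contains p.1 then vs.insert p.1 (pvNorm p.2) else vs)
      PySem.Dict.empty).items
    = (cv.filter (fun p => vids.contains p.1)).map (fun p => (p.1, pvNorm p.2)) := by
  rw [← List.foldl_filter]
  rw [PySem.Dict.items_foldl_insert_fresh _ (fun p : String × String => p.1)
        (fun p => pvNorm p.2) PySem.Dict.empty
        (fun a _ => PySem.Dict.contains_empty _) (pv_filter_map_nodup cv _ hnd)]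
  simp [PySem.Dict.empty]

theorem pv_items_ifold (cv : List (String × String)) (hnd : (cv.map Prod.fst).Nodup) :
    (cv.foldl (fun vs p => vs.insert p.1 p.2) PySem.Dict.empty).items = cv := by
  rw [PySem.Dict.items_foldl_insert_fresh _ (fun p : String × String => p.1)
        (fun p => p.2) PySem.Dict.empty
        (fun a _ => PySem.Dict.contains_empty _) (by simpa using hnd)]
  simp [PySem.Dict.empty]

theorem pv_get_mem (cv : List (String × String)) (hnd : (cv.map Prod.fst).Nodup)
    (p : String × String) (hp : p ∈ cv) : (PySem.Dict.mk cv).get? p.1 = some p.2 := by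
  have h1 : (p.1, p.2) ∈ (PySem.Dict.mk cv).items := by simpa using hp
  exact PySem.Dict.get?_of_mem_items _ h1 (by simpa [PySem.Dict.keys_mk] using hnd)

theorem pv_get_none (cv : List (String × String)) (c : String) (hc : c ∉ cv.map Prod.fst) :
    (PySem.Dict.mk cv).get? c = none := by
  rw [PySem.Dict.get?_eq_none_iff_not_mem_keys]
  simpa [PySem.Dict.keys_mk] using hc

theorem pv_main_false (cv : List (String × String)) (vids : List String)
    (hnd : (cv.map Prod.fst).Nodup) (hvnd : vids.Nodup) :
    enforce_vote_policy_py cv vids false = enforce_vote_policy_py_alt cv vids false := by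
  by_cases hv : vids.isEmpty
  · simp [enforce_vote_policy_py, enforce_vote_policy_py_alt, hv]
  · simp only [enforce_vote_policy_py, enforce_vote_policy_py_alt, hv, Bool.and_false,
      Bool.false_and, Bool.false_eq_true, if_false]
    rw [pv_foldA_false]
    simp only []
    set votes := cv.foldl
      (fun vs p => if vids.contains p.1 = true then vs.insert p.1 (pvNorm p.2) else vs)
      PySem.Dict.empty with hvotes
    have hitems : votes.items =
        (cv.filter (fun p => vids.contains p.1)).map (fun p => (p.1, pvNorm p.2)) :=
      pv_items_gfold vids cv hnd
    have hkeys : votes.keys = (cv.map Prod.fst).filter (fun c => vids.contains c) := by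
      simp only [PySem.Dict.keys, hitems, List.filter_map, List.map_map]
      rfl
    have hcont : ∀ c, votes.contains c =
        ((cv.map Prod.fst).filter (fun c => vids.contains c)).contains c := by
      intro c
      rw [PySem.Dict.contains_eq_decide_mem_keys, hkeys, List.contains_eq_mem]
    -- B's missing filter agrees with A's
    have hmiss : vids.filter
          (fun c => !((cv.map Prod.fst).filter (fun c => vids.contains c)).contains c)
        = vids.filter (fun c => !votes.contains c) :=
      List.filter_congr (fun c _ => by rw [hcont])
    -- the part-1 map over the present keys is exactly A's normalized filtered items
    have hpart1 : ((cv.map Prod.fst).filter (fun c => vids.contains c)).map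
          (fun c => (c, pvLook cv c))
        = (cv.filter (fun p => vids.contains p.1)).map (fun p => (p.1, pvNorm p.2)) := by
      rw [List.filter_map, List.map_map]
      refine List.map_congr_left (fun p hp => ?_)
      have hpcv : p ∈ cv := List.mem_of_mem_filter hp
      simp [Function.comp, pvLook, pv_get_mem cv hnd p hpcv, pvNorm]
    -- the part-2 map over missing ids is all-"abstain"
    have hpart2 : (vids.filter (fun c => !votes.contains c)).map (fun c => (c, pvLook cv c))
        = (vids.filter (fun c => !votes.contains c)).map (fun c => (c, "abstain")) := by
      refine List.map_congr_left (fun c hc => ?_)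
      have hcv : c ∈ vids := List.mem_of_mem_filter hc
      have hcc : votes.contains c = false := by
        have := List.of_mem_filter hc
        simpa using this
      have hnotmem : c ∉ cv.map Prod.fst := by
        intro hmem
        have hmemf : c ∈ (cv.map Prod.fst).filter (fun c => vids.contains c) :=
          List.mem_filter.mpr ⟨hmem, by simpa [List.contains_eq_mem] using hcv⟩
        have h3 : ((cv.map Prod.fst).filter (fun c => vids.contains c)).contains c = true := by
          simpa [List.contains_eq_mem] using hmemf
        rw [hcont c, h3] at hcc
        simp at hcc
      simp [pvLook, pv_get_none cv c hnotmem]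
    have hB : (fun c => (c,
          match (PySem.Dict.mk cv).get? c with
          | some v => if pyVoteValid v then v else "abstain"
          | none => "abstain")) = (fun c => (c, pvLook cv c)) := rfl
    rw [hB, List.map_append, hmiss, hpart1, hpart2]
    by_cases hm : (vids.filter (fun c => !votes.contains c)).isEmpty
    · rw [List.isEmpty_iff] at hm
      simp only [hm, List.isEmpty_nil, Bool.not_true, Bool.false_eq_true, if_false,
        List.map_nil, List.append_nil, hitems]
    · have hm' : (!(vids.filter (fun c => !votes.contains c)).isEmpty) = true := by
        simpa using hm
      rw [hm']
      simp only [if_true]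
      rw [PySem.Dict.items_foldl_insert_fresh _ (fun c : String => c)
            (fun _ => "abstain") votes
            (fun c hc => by simpa using List.of_mem_filter hc)
            (by simpa using hvnd.filter (fun c => !votes.contains c))]
      rw [hitems]

theorem pv_main_true (cv : List (String × String)) (vids : List String)
    (hnd : (cv.map Prod.fst).Nodup) (hv : vids.isEmpty = false)
    (hall : ∀ p ∈ cv, p.1 ∈ vids ∧ pyVoteValid p.2 = true)
    (hcov : ∀ c ∈ vids, c ∈ cv.map Prod.fst) :
    enforce_vote_policy_py cv vids true = enforce_vote_policy_py_alt cv vids true := by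
  have hex : PySem.Set.diff (PySem.Set.ofList (cv.map Prod.fst)) vids = [] := by
    simp only [PySem.Set.diff]
    refine List.filter_eq_nil_iff.mpr (fun c hc => ?_)
    have : c ∈ cv.map Prod.fst := by simpa [PySem.Set.mem_ofList] using hc
    obtain ⟨p, hp, rfl⟩ := List.mem_map.mp this
    simp [List.contains_eq_mem, (hall p hp).1]
  have hcontains : ∀ p ∈ cv, vids.contains p.1 = true ∧ pyVoteValid p.2 = true :=
    fun p hp => ⟨by simpa [List.contains_eq_mem] using (hall p hp).1, (hall p hp).2⟩
  simp only [enforce_vote_policy_py, enforce_vote_policy_py_alt, hv, hex,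
    List.isEmpty_nil, Bool.not_false, Bool.not_true, Bool.and_true, Bool.true_and,
    Bool.false_eq_true, if_false, if_true]
  rw [pv_foldA_true vids cv PySem.Dict.empty hcontains]
  simp only []
  set votes := cv.foldl (fun vs p => vs.insert p.1 p.2) PySem.Dict.empty with hvotes
  have hitems : votes.items = cv := pv_items_ifold cv hnd
  have hkeys : votes.keys = cv.map Prod.fst := by
    simp only [PySem.Dict.keys, hitems]
  have hmiss : vids.filter (fun c => !votes.contains c) = [] := by
    refine List.filter_eq_nil_iff.mpr (fun c hc => ?_)
    rw [PySem.Dict.contains_eq_decide_mem_keys, hkeys]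
    simp [hcov c hc]
  have hinv : cv.any (fun p => !pyVoteValid p.2) = false := by
    simp only [List.any_eq_false]
    intro p hp
    simp [(hall p hp).2]
  have hcov' : vids.any (fun c => !(cv.map Prod.fst).contains c) = false := by
    simp only [List.any_eq_false]
    intro c hc
    simp [List.contains_eq_mem, hcov c hc]
  have hpresent : (cv.map Prod.fst).filter (fun c => vids.contains c) = cv.map Prod.fst := by
    refine List.filter_eq_self.mpr (fun c hc => ?_)
    obtain ⟨p, hp, rfl⟩ := List.mem_map.mp hc
    exact (hcontains p hp).1
  have hmiss2 : vids.filter (fun c => !(cv.map Prod.fst).contains c) = [] := by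
    refine List.filter_eq_nil_iff.mpr (fun c hc => ?_)
    simp [List.contains_eq_mem, hcov c hc]
  rw [hmiss, hinv, hcov', hpresent]
  simp only [List.isEmpty_nil, Bool.not_true, Bool.false_eq_true, if_false, hitems]
  rw [hmiss2]
  simp only [List.append_nil, List.map_map]
  have : ∀ p ∈ cv, ((fun c => (c,
        match (PySem.Dict.mk cv).get? c with
        | some v => if pyVoteValid v then v else "abstain"
        | none => "abstain")) ∘ Prod.fst) p = p := by
    intro p hp
    simp [Function.comp, pv_get_mem cv hnd p hp, (hall p hp).2]
  rw [List.map_congr_left this]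
  simp

-- ===== VERDICT (by name: the statement is the Claim_ definition above) =====
theorem enforce_vote_policy_py_spec : Claim_equal_enforce_vote_policy_py := by
  intro cv vids strict _hdom hpre
  obtain ⟨hnd, hvnd, hstrict⟩ := hpre
  unfold Spec_enforce_vote_policy_py
  cases strict with
  | false => exact pv_main_false cv vids hnd hvnd
  | true =>
    by_cases hv : vids.isEmpty
    · simp [enforce_vote_policy_py, enforce_vote_policy_py_alt, hv]
    · obtain ⟨hall, hcov⟩ := hstrict rfl (by simpa [List.isEmpty_iff] using hv)
      exact pv_main_true cv vids hnd (by simpa using hv) hall hcov
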